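-- pv_equiv track=rewrite | github.com/faiz-akhtar/anlp_attentiongroup | Stylometric Analysis/FormattingMicroSignatureExtractor.py | _analyze_blank_line_groups
-- ===== SOURCE A (Python) =====
-- from typing import Dict, List, Tuple, Any
--
-- def _analyze_blank_line_groups(lines: List[str]) -> List[int]:
--     """Analyze patterns in blank line groupings."""
--     blank_groups = []
--     current_blank_count = 0
--
--     for line in lines:
--         if not line.strip():
--             current_blank_count += 1
--         else:
--             if current_blank_count > 0:
--                 blank_groups.append(current_blank_count)
--                 current_blank_count = 0
--
--     return blank_groups if blank_groups else [0]
-- ===== SOURCE B (Python) =====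
-- from typing import Dict, List, Tuple, Any
--
-- def _analyze_blank_line_groups(lines: List[str]) -> List[int]:
--     """Analyze patterns in blank line groupings (gap-between-nonblank-indices formulation)."""
--     nonblank = [i for i, line in enumerate(lines) if line.strip()]
--     gaps = [j - i - 1 for i, j in zip([-1] + nonblank, nonblank)]
--     groups = [g for g in gaps if g > 0]
--     return groups or [0]
-- ===== Notes on version B (the rewrite author's own statement) =====
-- stated objective: alternative
-- what changed: Replaces the accumulator-threaded counting loop by an index-arithmetic formulation: collect non-blank line indices, take differences of consecutive indices minus one (with -1 prepended), and keep the positive gaps; the trailing blank run is dropped structurally rather than by leftover state.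
import Mathlib
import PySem

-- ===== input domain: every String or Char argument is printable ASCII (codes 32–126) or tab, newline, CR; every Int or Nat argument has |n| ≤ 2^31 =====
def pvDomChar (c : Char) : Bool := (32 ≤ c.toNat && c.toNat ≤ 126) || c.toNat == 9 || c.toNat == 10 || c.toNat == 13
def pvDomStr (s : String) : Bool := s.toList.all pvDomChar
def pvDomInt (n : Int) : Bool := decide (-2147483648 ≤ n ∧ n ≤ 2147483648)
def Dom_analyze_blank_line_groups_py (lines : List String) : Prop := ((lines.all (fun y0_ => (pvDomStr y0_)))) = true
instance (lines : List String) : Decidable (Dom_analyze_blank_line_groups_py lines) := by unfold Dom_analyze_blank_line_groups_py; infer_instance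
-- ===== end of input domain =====

-- B replaces A's accumulator-threaded counting loop by index arithmetic over non-blank line positions (alternative decomposition, same cost).

-- ===== PORT A =====
-- literal transliteration of A: one fold threading (blank_groups, current_blank_count)
def analyze_blank_line_groups_py (lines : List String) : List Int :=
  let st := lines.foldl
    (fun (st : List Int × Int) line =>
      if PySem.Str.strip line = "" then (st.1, st.2 + 1)
      else if st.2 > 0 then (st.1 ++ [st.2], 0) else st)
    ([], 0)
  if st.1 = [] then [0] else st.1

-- ===== PORT B =====
-- literal transliteration of B: non-blank indices, consecutive gaps (with -1 prepended), keep positive gaps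
def analyze_blank_line_groups_py_alt (lines : List String) : List Int :=
  let nonblank : List Int :=
    ((PySem.List.enumerate lines).filter (fun p => !(PySem.Str.strip p.2 == ""))).map (fun p => p.1)
  let gaps := (List.zip ((-1 : Int) :: nonblank) nonblank).map (fun p => p.2 - p.1 - 1)
  let groups := gaps.filter (fun g => decide (g > 0))
  if groups = [] then [0] else groups

-- ===== PRECONDITION & SPEC =====
def Spec_analyze_blank_line_groups_py (lines : List String) (out : List Int) : Prop := out = analyze_blank_line_groups_py_alt lines
instance (lines : List String) (out : List Int) : Decidable (Spec_analyze_blank_line_groups_py lines out) := by unfold Spec_analyze_blank_line_groups_py; infer_instance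

-- ===== CLAIM (what is proved, stated in full; the proofs are below) =====
def Claim_equal_analyze_blank_line_groups_py : Prop := ∀ (lines : List String), Dom_analyze_blank_line_groups_py lines → Spec_analyze_blank_line_groups_py lines (analyze_blank_line_groups_py lines)

-- ===== LEMMAS AND PROOFS =====

-- common reference function: blank-run lengths followed by a non-blank line, with pending count c
def pvG (lines : List String) (c : Int) : List Int :=
  match lines with
  | [] => []
  | l :: ls =>
    if PySem.Str.strip l = "" then pvG ls (c + 1)
    else (if c > 0 then [c] else []) ++ pvG ls 0

theorem pvFoldA (lines : List String) (gs : List Int) (c : Int) (hc : 0 ≤ c) :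
    (lines.foldl
      (fun (st : List Int × Int) line =>
        if PySem.Str.strip line = "" then (st.1, st.2 + 1)
        else if st.2 > 0 then (st.1 ++ [st.2], 0) else st)
      (gs, c)).1 = gs ++ pvG lines c := by
  induction lines generalizing gs c with
  | nil => simp [pvG]
  | cons l ls ih =>
    simp only [List.foldl_cons, pvG]
    by_cases hb : PySem.Str.strip l = ""
    · simp only [hb]
      exact ih gs (c + 1) (by omega)
    · simp only [if_neg hb]
      by_cases hp : c > 0
      · simp only [if_pos hp]
        rw [ih (gs ++ [c]) 0 le_rfl]
        simp
      · have hc0 : c = 0 := by omega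
        subst hc0
        rw [if_neg hp, if_neg hp, List.nil_append]
        exact ih gs 0 le_rfl

theorem pvGapsB (lines : List String) (p k : Int) (hpk : p < k) :
    (((List.zip
        (p :: ((PySem.List.enumerate lines k).filter (fun q => !(PySem.Str.strip q.2 == ""))).map (fun q => q.1))
        (((PySem.List.enumerate lines k).filter (fun q => !(PySem.Str.strip q.2 == ""))).map (fun q => q.1))).map
        (fun q => q.2 - q.1 - 1)).filter (fun g => decide (g > 0)))
      = pvG lines (k - p - 1) := by
  induction lines generalizing p k with
  | nil => simp [PySem.List.enumerate, pvG]
  | cons l ls ih =>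
    rw [PySem.List.enumerate_cons]
    by_cases hb : PySem.Str.strip l = ""
    · simp only [List.filter_cons, hb, beq_self_eq_true, Bool.not_true, pvG]
      have := ih p (k + 1) (by omega)
      have he : k + 1 - p - 1 = (k - p - 1) + 1 := by ring
      rw [he] at this
      simpa using this
    · have hb' : (!(PySem.Str.strip l == "")) = true := by simp [hb]
      simp only [List.filter_cons, hb', if_pos, pvG, if_neg hb, List.map_cons]
      -- zip (p :: k :: rest) (k :: rest) = (p, k) :: zip (k :: rest) rest
      rw [List.zip_cons_cons, List.map_cons, List.filter_cons]
      rw [ih k (k + 1) (by omega)]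
      have he : k + 1 - k - 1 = (0 : Int) := by ring
      rw [he]
      by_cases h2 : (1 : Int) < k - p <;> simp [h2]

-- ===== VERDICT (by name: the statement is the Claim_ definition above) =====
theorem analyze_blank_line_groups_py_spec : Claim_equal_analyze_blank_line_groups_py := by
  intro lines _
  unfold Spec_analyze_blank_line_groups_py analyze_blank_line_groups_py analyze_blank_line_groups_py_alt
  simp only [pvFoldA lines [] 0 le_rfl]
  have := pvGapsB lines (-1) 0 (by norm_num)
  have he : (0 : Int) - (-1) - 1 = 0 := by ring
  rw [he] at this
  simp only [List.nil_append, this]
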